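-- pv_equiv track=rewrite | github.com/DiegoLandaeta03/csce489 | assignment-1/clique-problem-slides/model_decoder.py | decode_model
-- ===== SOURCE A (Python) =====
-- V = ["A","B","C","D","E","F","G","H","I"]
--
-- n = len(V)
--
-- def decode_model(model_lits, k):
--     chosen = {}
--     for lit in model_lits:
--         if lit > 0:
--             pos = (lit - 1) // n + 1
--             i = (lit - 1) % n
--             chosen[pos] = V[i]
--     return [chosen[p] for p in sorted(chosen)]
-- ===== SOURCE B (Python) =====
-- V = ["A","B","C","D","E","F","G","H","I"]
--
-- n = len(V)
--
-- def decode_model(model_lits, k):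
--     # Maintain one association list kept sorted by position at all times:
--     # each positive literal is inserted at its sorted place (overwriting the
--     # entry on an equal position), so no dict and no final sort are needed.
--     pairs = []  # (position, vertex), strictly increasing by position
--     for lit in model_lits:
--         if lit > 0:
--             pos = (lit - 1) // n + 1
--             v = V[(lit - 1) % n]
--             i = 0
--             while i < len(pairs) and pairs[i][0] < pos:
--                 i += 1
--             if i < len(pairs) and pairs[i][0] == pos:
--                 pairs[i] = (pos, v)
--             else:
--                 pairs.insert(i, (pos, v))
--     return [v for _, v in pairs]
-- ===== Notes on version B (the rewrite author's own statement) =====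
-- stated objective: alternative
-- what changed: Replaces the dict-overwrite-then-sort-the-keys scheme by a single pass that maintains one strictly position-sorted association list, inserting each positive literal at its sorted place and overwriting on an equal position, so neither a hash map nor a sort call is needed.
import Mathlib
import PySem

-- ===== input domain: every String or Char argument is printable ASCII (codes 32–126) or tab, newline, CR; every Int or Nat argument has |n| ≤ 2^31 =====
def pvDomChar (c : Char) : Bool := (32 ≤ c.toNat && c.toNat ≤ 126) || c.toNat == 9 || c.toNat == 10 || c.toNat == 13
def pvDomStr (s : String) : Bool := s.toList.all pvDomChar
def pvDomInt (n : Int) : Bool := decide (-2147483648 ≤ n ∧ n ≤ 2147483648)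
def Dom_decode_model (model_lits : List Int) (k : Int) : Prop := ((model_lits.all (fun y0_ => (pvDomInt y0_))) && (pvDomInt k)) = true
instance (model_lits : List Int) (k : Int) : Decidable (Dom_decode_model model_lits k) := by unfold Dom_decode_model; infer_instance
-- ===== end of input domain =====

-- B replaces A's dict-then-sort by one pass maintaining a strictly position-sorted
-- association list with sorted insertion / overwrite; alternative structure, no speed claim.

-- module-level  V = [...]  and  n = len(V)  (shared context of both ports)
def pyV : List String := ["A","B","C","D","E","F","G","H","I"]
def pyN : Int := PySem.List.len pyV

-- Python's locals  pos = (lit - 1) // n + 1  and  V[(lit - 1) % n]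
-- (the index (lit-1) % 9 is always in 0..8, so V[i] never raises; .getD "" is never hit)
def posOf (lit : Int) : Int := PySem.Int.floordiv (lit - 1) pyN + 1
def vtxOf (lit : Int) : String := (PySem.List.pyGet? pyV (PySem.Int.mod (lit - 1) pyN)).getD ""

-- ===== PORT A =====
def decode_model (model_lits : List Int) (k : Int) : List String :=
  let chosen : PySem.Dict Int String :=
    model_lits.foldl (fun d lit =>
      if lit > 0 then d.insert (posOf lit) (vtxOf lit) else d) PySem.Dict.empty
  -- chosen[p] for p ∈ sorted(chosen): the key is always present, so getD "" never defaults
  (PySem.List.sorted chosen.keys (fun p => p) false).map (fun p => chosen.getD p "")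

-- ===== PORT B =====
-- Source B's index scan "i = 0; while i < len(pairs) and pairs[i][0] < pos: …" followed by
-- overwrite-or-insert at i, as the obvious structural recursion on the sorted pair list
def insPos : List (Int × String) → Int → String → List (Int × String)
  | [], pos, v => [(pos, v)]
  | (p0, v0) :: rest, pos, v =>
    if p0 < pos then (p0, v0) :: insPos rest pos v
    else if p0 == pos then (pos, v) :: rest
    else (pos, v) :: (p0, v0) :: rest

def decode_model_alt (model_lits : List Int) (k : Int) : List String :=
  let pairs :=
    model_lits.foldl (fun (pairs : List (Int × String)) lit =>
      if lit > 0 then insPos pairs (posOf lit) (vtxOf lit) else pairs) []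
  pairs.map (fun pv => pv.2)

-- ===== PRECONDITION & SPEC =====
def Spec_decode_model (model_lits : List Int) (k : Int) (out : List String) : Prop := out = decode_model_alt model_lits k
instance (model_lits : List Int) (k : Int) (out : List String) : Decidable (Spec_decode_model model_lits k out) := by unfold Spec_decode_model; infer_instance

-- ===== CLAIM (what is proved, stated in full; the proofs are below) =====
def Claim_equal_decode_model : Prop := ∀ (model_lits : List Int) (k : Int), Dom_decode_model model_lits k → Spec_decode_model model_lits k (decode_model model_lits k)

-- ===== LEMMAS AND PROOFS =====

-- value of the LAST positive literal with position p (searched from the back)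
def lastValR (rl : List Int) (p : Int) : String :=
  match rl.find? (fun x => posOf x == p) with
  | some l => vtxOf l
  | none => ""

-- B's accumulated sorted assoc list over the filtered positive literals fl
def accB (fl : List Int) : List (Int × String) :=
  fl.foldl (fun pairs l => insPos pairs (posOf l) (vtxOf l)) []

lemma insPos_fst_mem (pr : List (Int × String)) (pos q : Int) (v : String) :
    q ∈ (insPos pr pos v).map Prod.fst ↔ q = pos ∨ q ∈ pr.map Prod.fst := by
  induction pr with
  | nil => simp [insPos]
  | cons e rest ih =>
    obtain ⟨p0, v0⟩ := e
    simp only [insPos]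
    split_ifs with h1 h2
    · simp only [List.map_cons, List.mem_cons, ih]
      tauto
    · have : p0 = pos := by simpa using h2
      subst this
      simp only [List.map_cons, List.mem_cons]
      tauto
    · simp only [List.map_cons, List.mem_cons]

lemma insPos_sorted (pr : List (Int × String)) (pos : Int) (v : String)
    (h : pr.Pairwise (fun a b => a.1 < b.1)) :
    (insPos pr pos v).Pairwise (fun a b => a.1 < b.1) := by
  induction pr with
  | nil => simp [insPos]
  | cons e rest ih =>
    obtain ⟨p0, v0⟩ := e
    rcases List.pairwise_cons.1 h with ⟨hhead, htail⟩
    simp only [insPos]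
    split_ifs with h1 h2
    · refine List.pairwise_cons.2 ⟨?_, ih htail⟩
      intro b hb
      have hb' : b.1 ∈ (insPos rest pos v).map Prod.fst := List.mem_map_of_mem hb
      rcases (insPos_fst_mem rest pos b.1 v).1 hb' with h | h
      · exact h ▸ h1
      · rcases List.mem_map.1 h with ⟨c, hc, hcb⟩
        exact hcb ▸ hhead c hc
    · have : p0 = pos := by simpa using h2
      subst this
      exact List.pairwise_cons.2 ⟨hhead, htail⟩
    · have hgt : pos < p0 := by simp only [beq_iff_eq] at h2; omega
      refine List.pairwise_cons.2 ⟨?_, h⟩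
      intro b hb
      rcases List.mem_cons.1 hb with rfl | hb
      · exact hgt
      · exact lt_trans hgt (hhead b hb)

lemma insPos_mem (pr : List (Int × String)) (pos q : Int) (v w : String)
    (h : pr.Pairwise (fun a b => a.1 < b.1)) :
    (q, w) ∈ insPos pr pos v ↔ (q = pos ∧ w = v) ∨ ((q, w) ∈ pr ∧ q ≠ pos) := by
  induction pr with
  | nil => simp [insPos]
  | cons e rest ih =>
    obtain ⟨p0, v0⟩ := e
    rcases List.pairwise_cons.1 h with ⟨hhead, htail⟩
    simp only [insPos]
    split_ifs with h1 h2
    · simp only [List.mem_cons, ih htail, Prod.mk.injEq]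
      constructor
      · rintro (⟨rfl, rfl⟩ | ⟨rfl, rfl⟩ | ⟨hm, hq⟩)
        · exact Or.inr ⟨Or.inl ⟨rfl, rfl⟩, by omega⟩
        · exact Or.inl ⟨rfl, rfl⟩
        · exact Or.inr ⟨Or.inr hm, hq⟩
      · rintro (⟨rfl, rfl⟩ | ⟨(⟨rfl, rfl⟩ | hm), hq⟩)
        · exact Or.inr (Or.inl ⟨rfl, rfl⟩)
        · exact Or.inl ⟨rfl, rfl⟩
        · exact Or.inr (Or.inr ⟨hm, hq⟩)

    · have : p0 = pos := by simpa using h2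
      subst this
      simp only [List.mem_cons, Prod.mk.injEq]
      constructor
      · rintro (⟨rfl, rfl⟩ | hm)
        · exact Or.inl ⟨rfl, rfl⟩
        · refine Or.inr ⟨Or.inr hm, ?_⟩
          intro he; subst he
          exact absurd rfl (ne_of_lt (hhead (q, w) hm))
      · rintro (⟨rfl, rfl⟩ | ⟨(⟨rfl, rfl⟩ | hm), hq⟩)
        · exact Or.inl ⟨rfl, rfl⟩
        · exact absurd rfl hq
        · exact Or.inr hm
    · have hgt : pos < p0 := by simp only [beq_iff_eq] at h2; omega
      simp only [List.mem_cons, Prod.mk.injEq]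
      constructor
      · rintro (⟨rfl, rfl⟩ | ⟨rfl, rfl⟩ | hm)
        · exact Or.inl ⟨rfl, rfl⟩
        · exact Or.inr ⟨Or.inl ⟨rfl, rfl⟩, by omega⟩
        · refine Or.inr ⟨Or.inr hm, ?_⟩
          intro he; subst he
          exact absurd (lt_trans hgt (hhead (q, w) hm)) (lt_irrefl _)
      · rintro (⟨rfl, rfl⟩ | ⟨(⟨rfl, rfl⟩ | hm), hq⟩)
        · exact Or.inl ⟨rfl, rfl⟩
        · exact Or.inr (Or.inl ⟨rfl, rfl⟩)
        · exact Or.inr (Or.inr hm)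

lemma accB_append (fl : List Int) (l : Int) :
    accB (fl ++ [l]) = insPos (accB fl) (posOf l) (vtxOf l) := by
  simp [accB, List.foldl_append]

lemma accB_sorted (fl : List Int) : (accB fl).Pairwise (fun a b => a.1 < b.1) := by
  induction fl using List.reverseRecOn with
  | nil => simp [accB]
  | append_singleton fl l ih => rw [accB_append]; exact insPos_sorted _ _ _ ih

lemma accB_fst_mem (fl : List Int) (q : Int) :
    q ∈ (accB fl).map Prod.fst ↔ q ∈ fl.map posOf := by
  induction fl using List.reverseRecOn with
  | nil => simp [accB]
  | append_singleton fl l ih =>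
    rw [accB_append, insPos_fst_mem, ih]
    simp only [List.map_append, List.map_cons, List.map_nil, List.mem_append, List.mem_cons]
    tauto

lemma accB_lastVal (fl : List Int) (q : Int) (w : String)
    (h : (q, w) ∈ accB fl) : lastValR fl.reverse q = w := by
  induction fl using List.reverseRecOn with
  | nil => simp [accB] at h
  | append_singleton fl l ih =>
    rw [accB_append] at h
    rw [insPos_mem _ _ _ _ _ (accB_sorted fl)] at h
    simp only [List.reverse_append, List.reverse_cons, List.reverse_nil,
      List.nil_append, List.cons_append, List.nil_append] at *
    rcases h with ⟨rfl, rfl⟩ | ⟨hm, hq⟩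
    · simp [lastValR, List.find?_cons_of_pos]
    · unfold lastValR
      rw [List.find?_cons_of_neg (by simpa using fun he => hq he.symm)]
      exact ih hm

-- A's dict characterised: lookup is the last write
lemma dict_getD (fl : List Int) (p : Int) :
    (fl.foldl (fun d l => d.insert (posOf l) (vtxOf l)) PySem.Dict.empty).getD p ""
      = lastValR fl.reverse p := by
  induction fl using List.reverseRecOn with
  | nil => simp [lastValR, PySem.Dict.getD_empty]
  | append_singleton fl l ih =>
    rw [List.foldl_append]
    simp only [List.foldl_cons, List.foldl_nil, List.reverse_append, List.reverse_cons,
      List.reverse_nil, List.nil_append, List.cons_append]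
    rw [PySem.Dict.getD_insert]
    by_cases hp : p = posOf l
    · rw [if_pos hp]
      simp [lastValR, List.find?_cons_of_pos, hp]
    · rw [if_neg hp]
      rw [ih]
      simp only [lastValR]
      rw [List.find?_cons_of_neg (by simpa using fun he => hp he.symm)]

theorem decode_model_spec : Claim_equal_decode_model := by
  intro ml k _
  simp only [Spec_decode_model, decode_model, decode_model_alt]
  rw [PySem.List.foldl_ite_eq_foldl_filter, PySem.List.foldl_ite_eq_foldl_filter]
  set fl := ml.filter (fun l => decide (l > 0)) with hfl
  -- A's dict: keys and lookups
  have hkeys : (fl.foldl (fun d l => d.insert (posOf l) (vtxOf l)) PySem.Dict.empty).keys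
      = PySem.Set.ofList (fl.map posOf) := by
    rw [PySem.Dict.keys_foldl_insert_key]
    simp [PySem.Dict.keys_empty, PySem.Set.update_nil_left]
  rw [hkeys]
  rw [List.map_congr_left (fun p _ => dict_getD fl p)]
  -- the sorted key list IS the fst-projection of B's sorted assoc list
  have hnodup : ((accB fl).map Prod.fst).Nodup := by
    have hpm : ((accB fl).map Prod.fst).Pairwise (· < ·) := List.pairwise_map.2 (accB_sorted fl)
    rw [List.Nodup]
    exact hpm.imp ne_of_lt
  have hperm : ((accB fl).map Prod.fst).Perm (PySem.Set.ofList (fl.map posOf)) := by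
    refine (List.perm_ext_iff_of_nodup hnodup (PySem.Set.nodup_ofList _)).2 ?_
    intro q
    rw [accB_fst_mem]
    simp [PySem.Set.mem_ofList]
  have hpw : ((accB fl).map Prod.fst).Pairwise (· < ·) := by
    rw [List.pairwise_map]
    exact accB_sorted fl
  have hsort : PySem.List.sorted (PySem.Set.ofList (fl.map posOf)) (fun p => p) false
      = (accB fl).map Prod.fst := by
    apply PySem.List.sorted_eq_of_perm_of_pairwise_lt <;> first | exact hperm | exact hpw
  rw [hsort, List.map_map]
  change _ = (accB fl).map (fun pv => pv.2)
  apply List.map_congr_left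
  intro e he
  exact accB_lastVal fl e.1 e.2 he
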